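-- pv_equiv track=rewrite | github.com/nvamsi2015/elementary-DS | hashtables-questions.py | sum_divisible_by_k
-- ===== SOURCE A (Python) =====
-- def sum_divisible_by_k(A,k):
--     remainder = sum(A)%k
--     last = {0:-1}
--     current_sum = 0
--     min_length = n = len(A)
--     for i,a in enumerate(A):
--         current_sum = (current_sum+a) %k
--         last[current_sum] = i
--         want = (current_sum-remainder) %k
--         if want in last:
--             min_length = min(min_length, i - last[want])
--     return min_length if min_length <n else -1
-- ===== SOURCE B (Python) =====
-- def sum_divisible_by_k(A, k):
--     n = len(A)
--     r = sum(A) % k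
--     if r == 0:
--         return 0 if n > 0 else -1
--     best = n
--     suffix = A
--     while suffix:
--         s = 0
--         length = 0
--         for a in suffix:
--             s = (s + a) % k
--             length += 1
--             if s == r and length < best:
--                 best = length
--         suffix = suffix[1:]
--     return best if best < n else -1
-- ===== Notes on version B (the rewrite author's own statement) =====
-- stated objective: simpler
-- what changed: Replaces A's single hash-map pass (last-occurrence dict of prefix sums mod k) by a plain double scan that accumulates each subarray's running sum mod k directly, with the empty/zero-remainder cases read off up front; no dictionary at all.
import Mathlib
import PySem

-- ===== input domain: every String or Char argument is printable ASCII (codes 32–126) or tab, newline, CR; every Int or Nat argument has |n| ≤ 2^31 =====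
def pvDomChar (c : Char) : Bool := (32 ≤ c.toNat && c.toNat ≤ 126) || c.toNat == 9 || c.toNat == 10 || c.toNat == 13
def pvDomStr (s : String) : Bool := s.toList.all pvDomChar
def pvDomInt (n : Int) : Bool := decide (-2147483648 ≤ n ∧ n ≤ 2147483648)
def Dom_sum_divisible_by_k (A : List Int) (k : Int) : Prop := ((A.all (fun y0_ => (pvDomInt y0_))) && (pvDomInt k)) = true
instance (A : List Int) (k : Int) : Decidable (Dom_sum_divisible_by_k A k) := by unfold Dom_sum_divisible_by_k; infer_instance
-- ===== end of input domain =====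

-- B replaces A's single hash-map pass by a plain double scan over all subarrays (no dict); objective: simpler, not faster.

-- ===== PORT A =====
def aStep (k r : Int) (st : PySem.Dict Int Int × Int × Int) (ia : Int × Int) :
    PySem.Dict Int Int × Int × Int :=
  let cs := PySem.Int.mod (st.2.1 + ia.2) k
  let last := st.1.insert cs ia.1
  let want := PySem.Int.mod (cs - r) k
  match last.get? want with
  | some j => (last, cs, min st.2.2 (ia.1 - j))
  | none => (last, cs, st.2.2)

def sum_divisible_by_k (A : List Int) (k : Int) : Int :=
  let remainder := PySem.Int.mod A.sum k
  let n : Int := (A.length : Int)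
  let st := (PySem.List.enumerate A 0).foldl (aStep k remainder)
              (PySem.Dict.ofList [(0, -1)], 0, n)
  if st.2.2 < n then st.2.2 else -1

-- ===== PORT B =====
def bScan (k r : Int) (suffix : List Int) (best : Int) : Int :=
  (suffix.foldl (fun (p : Int × Int × Int) a =>
      let s := PySem.Int.mod (p.1 + a) k
      let len := p.2.1 + 1
      (s, len, if s = r ∧ len < p.2.2 then len else p.2.2)) (0, 0, best)).2.2

def bLoop (k r : Int) : List Int → Int → Int
  | [], best => best
  | a :: rest, best => bLoop k r rest (bScan k r (a :: rest) best)

def sum_divisible_by_k_alt (A : List Int) (k : Int) : Int :=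
  let n : Int := (A.length : Int)
  let r := PySem.Int.mod A.sum k
  if r = 0 then (if 0 < n then 0 else -1)
  else
    let best := bLoop k r A n
    if best < n then best else -1

-- ===== PRECONDITION & SPEC =====
-- Pre_ excludes exactly k = 0, on which Python's `sum(A) % k` raises ZeroDivisionError (in A and in B alike).
def Pre_sum_divisible_by_k (A : List Int) (k : Int) : Prop := k ≠ 0
instance (A : List Int) (k : Int) : Decidable (Pre_sum_divisible_by_k A k) := by unfold Pre_sum_divisible_by_k; infer_instance
def pvWitness_sum_divisible_by_k : List Int × Int := ([3, 1, 4, 2], 6)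

def Spec_sum_divisible_by_k (A : List Int) (k : Int) (out : Int) : Prop := out = sum_divisible_by_k_alt A k
instance (A : List Int) (k : Int) (out : Int) : Decidable (Spec_sum_divisible_by_k A k out) := by unfold Spec_sum_divisible_by_k; infer_instance

-- ===== CLAIM (what is proved, stated in full; the proofs are below) =====
def Claim_equal_sum_divisible_by_k : Prop := ∀ (A : List Int) (k : Int), Dom_sum_divisible_by_k A k → Pre_sum_divisible_by_k A k → Spec_sum_divisible_by_k A k (sum_divisible_by_k A k)

-- ===== LEMMAS AND PROOFS =====

-- ---- modular-arithmetic toolkit for PySem.Int.mod (Python's %) ----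

theorem pv_mod_eq_mod_iff {k : Int} (hk : k ≠ 0) (x y : Int) :
    PySem.Int.mod x k = PySem.Int.mod y k ↔ k ∣ (x - y) := by
  constructor
  · intro h
    have h1 := PySem.Int.floordiv_mul_add_mod x k
    have h2 := PySem.Int.floordiv_mul_add_mod y k
    exact ⟨PySem.Int.floordiv x k - PySem.Int.floordiv y k, by linarith⟩
  · intro h
    have h1 := PySem.Int.floordiv_mul_add_mod x k
    have h2 := PySem.Int.floordiv_mul_add_mod y k
    have hd : k ∣ (PySem.Int.mod x k - PySem.Int.mod y k) := by
      obtain ⟨c, hc⟩ := h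
      exact ⟨c - PySem.Int.floordiv x k + PySem.Int.floordiv y k, by linarith⟩
    have hb : |PySem.Int.mod x k - PySem.Int.mod y k| < |k| := by
      rcases lt_or_gt_of_ne hk with hneg | hpos
      · have b1 := PySem.Int.mod_neg_bounds x hneg
        have b2 := PySem.Int.mod_neg_bounds y hneg
        rw [abs_lt, abs_of_neg hneg]; constructor <;> linarith
      · have b1 := PySem.Int.mod_nonneg x hpos
        have b2 := PySem.Int.mod_nonneg y hpos
        have c1 := PySem.Int.mod_lt x hpos
        have c2 := PySem.Int.mod_lt y hpos
        rw [abs_lt, abs_of_pos hpos]; constructor <;> linarith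
    have := Int.eq_zero_of_abs_lt_dvd ((abs_dvd k _).2 hd) hb
    omega

theorem pv_mod_zero (k : Int) : PySem.Int.mod 0 k = 0 :=
  (PySem.Int.mod_eq_zero_iff_dvd 0 k).2 (dvd_zero k)

theorem pv_mod_idem {k : Int} (hk : k ≠ 0) (x : Int) :
    PySem.Int.mod (PySem.Int.mod x k) k = PySem.Int.mod x k := by
  rw [pv_mod_eq_mod_iff hk]
  have h1 := PySem.Int.floordiv_mul_add_mod x k
  exact ⟨-PySem.Int.floordiv x k, by linarith⟩

theorem pv_mod_add_left {k : Int} (hk : k ≠ 0) (x y : Int) :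
    PySem.Int.mod (PySem.Int.mod x k + y) k = PySem.Int.mod (x + y) k := by
  rw [pv_mod_eq_mod_iff hk]
  have h1 := PySem.Int.floordiv_mul_add_mod x k
  exact ⟨-PySem.Int.floordiv x k, by linarith⟩

-- ---- foldl-min toolkit ----

theorem pv_foldl_min_le_init (l : List Int) (a : Int) : l.foldl min a ≤ a := by
  induction l generalizing a with
  | nil => simp
  | cons x xs ih => exact le_trans (ih _) (min_le_left _ _)

theorem pv_foldl_min_le_mem {c : Int} : ∀ (l : List Int) (a : Int), c ∈ l → l.foldl min a ≤ c
  | [], _, h => by cases h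
  | x :: xs, a, h => by
    rcases List.mem_cons.1 h with rfl | h'
    · exact le_trans (pv_foldl_min_le_init xs (min a c)) (min_le_right a c)
    · exact pv_foldl_min_le_mem xs (min a x) h' 

theorem pv_foldl_min_cases (l : List Int) (a : Int) :
    l.foldl min a = a ∨ l.foldl min a ∈ l := by
  induction l generalizing a with
  | nil => left; rfl
  | cons x xs ih =>
    rcases ih (min a x) with h | h
    · rcases le_total a x with hax | hax
      · left; rw [List.foldl_cons, h, min_eq_left hax]
      · right; rw [List.foldl_cons, h, min_eq_right hax]; exact List.mem_cons_self
    · right; exact List.mem_cons_of_mem _ h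

theorem pv_le_foldl_min {l : List Int} {a b : Int} (ha : b ≤ a)
    (h : ∀ c ∈ l, b ≤ c) : b ≤ l.foldl min a := by
  rcases pv_foldl_min_cases l a with he | he
  · omega
  · exact h _ he

theorem pv_foldl_min_eq {l1 l2 : List Int} (a : Int)
    (h1 : ∀ c ∈ l1, ∃ c' ∈ l2, c' ≤ c) (h2 : ∀ c ∈ l2, ∃ c' ∈ l1, c' ≤ c) :
    l1.foldl min a = l2.foldl min a := by
  apply le_antisymm
  · rcases pv_foldl_min_cases l2 a with he | he
    · rw [he]; exact pv_foldl_min_le_init _ _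
    · obtain ⟨c', hc', hle⟩ := h2 _ he
      exact le_trans (pv_foldl_min_le_mem _ a hc') hle
  · rcases pv_foldl_min_cases l1 a with he | he
    · rw [he]; exact pv_foldl_min_le_init _ _
    · obtain ⟨c', hc', hle⟩ := h1 _ he
      exact le_trans (pv_foldl_min_le_mem _ a hc') hle

-- ---- prefix-sum machinery shared by both characterizations ----

def pvPm (A : List Int) (k : Int) (t : Nat) : Int := PySem.Int.mod ((A.take t).sum) k

def pvWant (A : List Int) (k : Int) (t : Nat) : Int :=
  PySem.Int.mod (pvPm A k t - PySem.Int.mod A.sum k) k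

def pvLastOcc (A : List Int) (k : Int) (t : Nat) (v : Int) : Option Nat :=
  ((List.range (t+1)).filter (fun s => pvPm A k s == v)).getLast?

def pvCand (A : List Int) (k : Int) (t : Nat) : Option Int :=
  (pvLastOcc A k t (pvWant A k t)).map (fun s => (t : Int) - (s : Int))

def pvLA (A : List Int) (k : Int) : List Int :=
  (List.range A.length).filterMap (fun u => pvCand A k (u+1))

def pvLBsuf (k r : Int) (xs : List Int) : List Int :=
  (List.range xs.length).filterMap
    (fun j => if PySem.Int.mod ((xs.take (j+1)).sum) k = r then some ((j : Int)+1) else none)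

def pvLB (k r : Int) : List Int → List Int
  | [] => []
  | a :: rest => pvLBsuf k r (a :: rest) ++ pvLB k r rest

theorem pv_pm_zero (A : List Int) (k : Int) : pvPm A k 0 = 0 := by
  unfold pvPm; simpa using pv_mod_zero k

theorem pv_pm_succ {A : List Int} {k a : Int} {L : Nat} (hk : k ≠ 0)
    (ha : A[L]? = some a) :
    pvPm A k (L+1) = PySem.Int.mod (pvPm A k L + a) k := by
  unfold pvPm
  rw [List.take_add_one, ha]
  simp only [Option.toList_some, List.sum_append, List.sum_cons, List.sum_nil, add_zero]
  exact (pv_mod_add_left hk _ _).symm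

-- pairwise-< lists: every member is at most the last
theorem pv_mem_le_getLast {l : List Nat} (hp : l.Pairwise (· < ·)) {x y : Nat}
    (hx : x ∈ l) (hy : l.getLast? = some y) : x ≤ y := by
  induction l with
  | nil => cases hx
  | cons z zs ih =>
    rcases List.pairwise_cons.1 hp with ⟨hz, hp'⟩
    cases zs with
    | nil =>
      simp only [List.mem_singleton] at hx
      simp only [List.getLast?_singleton, Option.some.injEq] at hy
      omega
    | cons w ws =>
      have hy' : (w :: ws).getLast? = some y := by
        simpa [List.getLast?_cons_cons] using hy
      rcases List.mem_cons.1 hx with rfl | hx'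
      · have : y ∈ w :: ws := by
          have := List.getLast?_eq_some_iff.1 hy'
          obtain ⟨l', hl'⟩ := this
          rw [hl']; simp
        exact le_of_lt (hz _ this)
      · exact ih hp' hx' hy'

theorem pv_lastOcc_spec {A : List Int} {k : Int} {t s : Nat} {v : Int}
    (h : pvLastOcc A k t v = some s) : s ≤ t ∧ pvPm A k s = v := by
  unfold pvLastOcc at h
  have hmem : s ∈ (List.range (t+1)).filter (fun s => pvPm A k s == v) := by
    obtain ⟨l', hl'⟩ := List.getLast?_eq_some_iff.1 h
    rw [hl']; simp
  rcases List.mem_filter.1 hmem with ⟨hr, hp⟩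
  refine ⟨by simpa using Nat.lt_succ_iff.1 (List.mem_range.1 hr), by simpa using hp⟩

theorem pv_lastOcc_last {A : List Int} {k : Int} {t s : Nat} {v : Int}
    (hs : s ≤ t) (hv : pvPm A k s = v) :
    ∃ s', pvLastOcc A k t v = some s' ∧ s ≤ s' := by
  have hmem : s ∈ (List.range (t+1)).filter (fun s => pvPm A k s == v) := by
    refine List.mem_filter.2 ⟨List.mem_range.2 (by omega), by simpa using hv⟩
  have hne : (List.range (t+1)).filter (fun s => pvPm A k s == v) ≠ [] :=
    List.ne_nil_of_mem hmem
  obtain ⟨s', hs'⟩ := Option.isSome_iff_exists.1 (List.getLast?_isSome.2 hne)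
  refine ⟨s', hs', ?_⟩
  exact pv_mem_le_getLast (List.Pairwise.filter _ (List.pairwise_lt_range)) hmem hs'

theorem pv_lastOcc_succ_self {A : List Int} {k : Int} {t : Nat} :
    pvLastOcc A k (t+1) (pvPm A k (t+1)) = some (t+1) := by
  unfold pvLastOcc
  rw [List.range_succ, List.filter_append]
  simp

theorem pv_lastOcc_succ_ne {A : List Int} {k : Int} {t : Nat} {v : Int}
    (h : v ≠ pvPm A k (t+1)) :
    pvLastOcc A k (t+1) v = pvLastOcc A k t v := by
  unfold pvLastOcc
  rw [List.range_succ, List.filter_append]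
  have hb : (pvPm A k (t+1) == v) = false := beq_eq_false_iff_ne.2 (fun e => h e.symm)
  simp [hb]

-- ---- A-side characterization ----

theorem pvA_inv {A : List Int} {k : Int} (hk : k ≠ 0) :
    ∀ (rest : List Int) (L : Nat) (d : PySem.Dict Int Int) (ml : Int),
      A.drop L = rest →
      (∀ v, d.get? v = (pvLastOcc A k L v).map (fun s => (s : Int) - 1)) →
      ((PySem.List.enumerate rest (L : Int)).foldl (aStep k (PySem.Int.mod A.sum k))
          (d, pvPm A k L, ml)).2.2
        = List.foldl min ml
            ((List.range rest.length).filterMap (fun u => pvCand A k (L + u + 1))) := by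
  intro rest
  induction rest with
  | nil => intro L d ml hA hinv; simp [PySem.List.enumerate_nil]
  | cons a rest' ih =>
    intro L d ml hA hinv
    have ha : A[L]? = some a := by
      have h0 : (A.drop L)[0]? = some a := by rw [hA]; rfl
      simpa using h0
    have hdrop' : A.drop (L+1) = rest' := by
      have h := congrArg List.tail hA
      rw [List.tail_drop] at h
      simpa using h
    rw [PySem.List.enumerate_cons]
    have hpm : PySem.Int.mod (pvPm A k L + a) k = pvPm A k (L + 1) :=
      (pv_pm_succ hk ha).symm
    have hinv' : ∀ v, (d.insert (pvPm A k (L + 1)) ((L : Nat) : Int)).get? v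
        = (pvLastOcc A k (L + 1) v).map (fun s => (s : Int) - 1) := by
      intro v
      by_cases hv : v = pvPm A k (L + 1)
      · subst hv
        rw [PySem.Dict.get?_insert_self, pv_lastOcc_succ_self]
        simp
      · rw [PySem.Dict.get?_insert_of_ne _ _ hv, pv_lastOcc_succ_ne hv, hinv]
    have hstep : aStep k (PySem.Int.mod A.sum k) (d, pvPm A k L, ml) ((L : Int), a)
        = (d.insert (pvPm A k (L + 1)) ((L : Int)), pvPm A k (L + 1),
           match pvCand A k (L + 1) with
           | some c => min ml c
           | none => ml) := by
      unfold aStep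
      simp only [hpm]
      have hw : PySem.Int.mod (pvPm A k (L + 1) - PySem.Int.mod A.sum k) k
          = pvWant A k (L + 1) := rfl
      rw [hw, hinv' (pvWant A k (L + 1))]
      unfold pvCand
      cases hlo : pvLastOcc A k (L + 1) (pvWant A k (L + 1)) with
      | none => simp
      | some s =>
        have hc : (L : Int) - ((s : Int) - 1) = ((L + 1 : Nat) : Int) - (s : Int) := by
          push_cast; ring
        simp [hc]
    rw [List.foldl_cons, hstep]
    have hcast : (L : Int) + 1 = (((L + 1 : Nat)) : Int) := by push_cast; ring
    rw [hcast]
    rw [ih (L+1) _ _ hdrop' hinv']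
    have hfn : ((List.range rest'.length).filterMap (fun u => pvCand A k ((L + 1) + u + 1)))
        = ((List.range rest'.length).filterMap (fun u => pvCand A k (L + (u + 1) + 1))) := by
      apply List.filterMap_congr
      intro u _
      congr 1
      omega
    rw [hfn]
    have hrange : List.range (rest'.length + 1) = 0 :: (List.range rest'.length).map Nat.succ :=
      List.range_succ_eq_map
    simp only [List.length_cons, hrange, List.filterMap_cons, List.filterMap_map]
    have : (fun u => pvCand A k (L + Nat.succ u + 1)) = (fun u => pvCand A k (L + (u + 1) + 1)) := by
      funext u; rfl
    cases hc : pvCand A k (L + 0 + 1) with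
    | none => simp only [Function.comp, this]
    | some c => simp only [Function.comp, this]; rfl

-- ---- B-side characterization ----

theorem pvB_inner {k : Int} (hk : k ≠ 0) (r : Int) :
    ∀ (ys xs : List Int) (j : Nat) (best : Int), xs.drop j = ys →
      ((ys.foldl (fun (p : Int × Int × Int) a =>
          let s := PySem.Int.mod (p.1 + a) k
          let len := p.2.1 + 1
          (s, len, if s = r ∧ len < p.2.2 then len else p.2.2))
        (pvPm xs k j, (j : Int), best))).2.2
      = List.foldl min best ((List.range ys.length).filterMap
          (fun u => if pvPm xs k (j + u + 1) = r then some ((j + u + 1 : Nat) : Int) else none)) := by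
  intro ys
  induction ys with
  | nil => intro xs j best hA; simp
  | cons y ys' ih =>
    intro xs j best hA
    have ha : xs[j]? = some y := by
      have h0 : (xs.drop j)[0]? = some y := by rw [hA]; rfl
      simpa using h0
    have hdrop' : xs.drop (j+1) = ys' := by
      have h := congrArg List.tail hA
      rw [List.tail_drop] at h
      simpa using h
    rw [List.foldl_cons]
    have hpm : PySem.Int.mod (pvPm xs k j + y) k = pvPm xs k (j + 1) :=
      (pv_pm_succ hk ha).symm
    have hbest : (if pvPm xs k (j + 1) = r ∧ (j : Int) + 1 < best
          then (j : Int) + 1 else best)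
        = (if pvPm xs k (j + 1) = r then min best (((j + 1 : Nat)) : Int) else best) := by
      split_ifs with h1 h2 h3 <;> push_cast <;> omega
    simp only [hpm]
    rw [show (fun (p : Int × Int × Int) a =>
          let s := PySem.Int.mod (p.1 + a) k
          let len := p.2.1 + 1
          (s, len, if s = r ∧ len < p.2.2 then len else p.2.2)) = (fun (p : Int × Int × Int) a =>
          let s := PySem.Int.mod (p.1 + a) k
          let len := p.2.1 + 1
          (s, len, if s = r ∧ len < p.2.2 then len else p.2.2)) from rfl]
    rw [hbest]
    have hcast : (j : Int) + 1 = (((j + 1 : Nat)) : Int) := by push_cast; ring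
    rw [hcast]
    rw [ih xs (j+1) _ hdrop']
    have hfn : ((List.range ys'.length).filterMap
          (fun u => if pvPm xs k ((j + 1) + u + 1) = r then some (((j + 1) + u + 1 : Nat) : Int) else none))
        = ((List.range ys'.length).filterMap
          (fun u => if pvPm xs k (j + (u + 1) + 1) = r then some ((j + (u + 1) + 1 : Nat) : Int) else none)) := by
      apply List.filterMap_congr
      intro u _
      have : (j + 1) + u + 1 = j + (u + 1) + 1 := by omega
      rw [this]
    rw [hfn]
    have hrange : List.range (ys'.length + 1) = 0 :: (List.range ys'.length).map Nat.succ :=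
      List.range_succ_eq_map
    simp only [List.length_cons, hrange, List.filterMap_cons, List.filterMap_map]
    simp only [Nat.add_zero]
    by_cases hc : pvPm xs k (j + 1) = r
    · rw [if_pos hc, if_pos hc]
      rfl
    · rw [if_neg hc, if_neg hc]
      rfl

theorem pv_bScan_eq {k : Int} (hk : k ≠ 0) (r : Int) (xs : List Int) (best : Int) :
    bScan k r xs best = List.foldl min best (pvLBsuf k r xs) := by
  unfold bScan pvLBsuf
  have h := pvB_inner hk r xs xs 0 best (by simp)
  rw [pv_pm_zero xs k] at h
  norm_num at h
  rw [h]
  congr 1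

theorem pv_bLoop_eq {k : Int} (hk : k ≠ 0) (r : Int) :
    ∀ (xs : List Int) (best : Int), bLoop k r xs best = List.foldl min best (pvLB k r xs) := by
  intro xs
  induction xs with
  | nil => intro best; rfl
  | cons a rest ih =>
    intro best
    show bLoop k r rest (bScan k r (a :: rest) best) = _
    rw [ih, pv_bScan_eq hk]
    show _ = List.foldl min best (pvLBsuf k r (a :: rest) ++ pvLB k r rest)
    rw [List.foldl_append]

-- ---- membership characterizations ----

theorem pv_mem_LA {A : List Int} {k c : Int} :
    c ∈ pvLA A k ↔ ∃ t s : Nat, 1 ≤ t ∧ t ≤ A.length ∧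
      pvLastOcc A k t (pvWant A k t) = some s ∧ c = (t : Int) - (s : Int) := by
  unfold pvLA
  simp only [List.mem_filterMap, List.mem_range]
  constructor
  · rintro ⟨u, hu, hc⟩
    unfold pvCand at hc
    cases hlo : pvLastOcc A k (u+1) (pvWant A k (u+1)) with
    | none => rw [hlo] at hc; cases hc
    | some s =>
      rw [hlo] at hc
      simp at hc
      exact ⟨u+1, s, by omega, by omega, hlo, by omega⟩
  · rintro ⟨t, s, h1, h2, hlo, hc⟩
    refine ⟨t - 1, by omega, ?_⟩
    have ht : t - 1 + 1 = t := by omega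
    rw [ht]
    unfold pvCand
    rw [hlo]
    simp [hc]

theorem pv_mem_LBsuf {k r c : Int} {xs : List Int} :
    c ∈ pvLBsuf k r xs ↔ ∃ j : Nat, j < xs.length ∧
      PySem.Int.mod ((xs.take (j+1)).sum) k = r ∧ c = (j : Int) + 1 := by
  unfold pvLBsuf
  simp only [List.mem_filterMap, List.mem_range]
  constructor
  · rintro ⟨j, hj, hc⟩
    split_ifs at hc with h
    simp only [Option.some.injEq] at hc
    exact ⟨j, hj, h, hc.symm⟩
  · rintro ⟨j, hj, h, hc⟩
    exact ⟨j, hj, by rw [if_pos h, hc]⟩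

theorem pv_mem_LB {k r c : Int} :
    ∀ {xs : List Int}, c ∈ pvLB k r xs ↔ ∃ i : Nat, i < xs.length ∧ c ∈ pvLBsuf k r (xs.drop i) := by
  intro xs
  induction xs with
  | nil => simp [pvLB]
  | cons a rest ih =>
    show c ∈ pvLBsuf k r (a :: rest) ++ pvLB k r rest ↔ _
    rw [List.mem_append, ih]
    constructor
    · rintro (h | ⟨i, hi, h⟩)
      · exact ⟨0, by simp, by simpa using h⟩
      · exact ⟨i+1, by simpa using hi, by simpa using h⟩
    · rintro ⟨i, hi, h⟩
      cases i with
      | zero => left; simpa using h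
      | succ i' => right; exact ⟨i', by simpa using hi, by simpa using h⟩

-- segment sum vs prefix sums
theorem pv_seg_sum (A : List Int) {s t : Nat} (h : s ≤ t) :
    ((A.drop s).take (t - s)).sum = (A.take t).sum - (A.take s).sum := by
  have h1 : A.take t = A.take s ++ (A.drop s).take (t - s) := by
    have hst : s + (t - s) = t := by omega
    rw [← hst, List.take_add]
    congr 2
    omega
  rw [h1, List.sum_append]
  ring

theorem pv_cond_iff {A : List Int} {k : Int} (hk : k ≠ 0) {s t : Nat} (h : s ≤ t) :
    PySem.Int.mod (((A.drop s).take (t - s)).sum) k = PySem.Int.mod A.sum k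
      ↔ pvPm A k s = pvWant A k t := by
  have hseg := pv_seg_sum A h
  unfold pvWant pvPm
  rw [hseg]
  have e1 : PySem.Int.mod (PySem.Int.mod A.sum k) k = PySem.Int.mod A.sum k := pv_mod_idem hk _
  have h2 := PySem.Int.floordiv_mul_add_mod (A.take t).sum k
  have h3 := PySem.Int.floordiv_mul_add_mod A.sum k
  constructor
  · intro hmod
    rw [pv_mod_eq_mod_iff hk] at hmod ⊢
    obtain ⟨c1, hc1⟩ := hmod
    exact ⟨-c1 + PySem.Int.floordiv (A.take t).sum k - PySem.Int.floordiv A.sum k, by linarith⟩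
  · intro hmod
    rw [pv_mod_eq_mod_iff hk] at hmod ⊢
    obtain ⟨c1, hc1⟩ := hmod
    exact ⟨-c1 + PySem.Int.floordiv (A.take t).sum k - PySem.Int.floordiv A.sum k, by linarith⟩

-- with a nonzero remainder a matching prefix index is strictly below t
theorem pv_match_ne {A : List Int} {k : Int} (hk : k ≠ 0)
    (hr : PySem.Int.mod A.sum k ≠ 0) {t : Nat}
    (h : pvPm A k t = pvWant A k t) : False := by
  have h' : PySem.Int.mod (pvPm A k t) k
      = PySem.Int.mod (pvPm A k t - PySem.Int.mod A.sum k) k := by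
    unfold pvPm at h ⊢
    rw [pv_mod_idem hk]
    exact h
  rw [pv_mod_eq_mod_iff hk] at h'
  obtain ⟨c, hc⟩ := h'
  apply hr
  rw [PySem.Int.mod_eq_zero_iff_dvd]
  have h3 := PySem.Int.floordiv_mul_add_mod A.sum k
  exact ⟨c + PySem.Int.floordiv A.sum k, by linarith⟩


-- ---- top-level characterizations ----

theorem pvA_eq {A : List Int} {k : Int} (hk : k ≠ 0) :
    sum_divisible_by_k A k =
      (if List.foldl min ((A.length : Int)) (pvLA A k) < (A.length : Int)
       then List.foldl min ((A.length : Int)) (pvLA A k) else -1) := by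
  have hinv0 : ∀ v, (PySem.Dict.ofList [((0 : Int), (-1 : Int))]).get? v
      = (pvLastOcc A k 0 v).map (fun s => (s : Int) - 1) := by
    intro v
    have he : (PySem.Dict.ofList [((0 : Int), (-1 : Int))])
        = (PySem.Dict.empty.insert 0 (-1)) := rfl
    have h0 : pvPm A k 0 = 0 := pv_pm_zero A k
    have hocc : pvLastOcc A k 0 v = if v = 0 then some 0 else none := by
      unfold pvLastOcc
      by_cases h : v = 0
      · simp [h, h0]
      · have hb : (pvPm A k 0 == v) = false := by
          rw [h0]; exact beq_eq_false_iff_ne.2 (fun e => h e.symm)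
        simp [hb, h]
    rw [hocc, he]
    by_cases h : v = 0
    · subst h; rw [PySem.Dict.get?_insert_self]; simp
    · rw [PySem.Dict.get?_insert_of_ne _ _ h, if_neg h, PySem.Dict.get?_empty]; simp
  have h := pvA_inv (A := A) hk A 0 (PySem.Dict.ofList [((0 : Int), (-1 : Int))])
      ((A.length : Int)) (by simp) hinv0
  rw [pv_pm_zero] at h
  norm_num at h
  simp only [sum_divisible_by_k]
  rw [h]
  rfl

theorem pvB_eq {A : List Int} {k : Int} (hk : k ≠ 0) :
    sum_divisible_by_k_alt A k =
      (if PySem.Int.mod A.sum k = 0 then (if 0 < (A.length : Int) then 0 else -1)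
       else (if List.foldl min ((A.length : Int)) (pvLB k (PySem.Int.mod A.sum k) A) < (A.length : Int)
             then List.foldl min ((A.length : Int)) (pvLB k (PySem.Int.mod A.sum k) A) else -1)) := by
  unfold sum_divisible_by_k_alt
  by_cases h : PySem.Int.mod A.sum k = 0 <;> simp [h, pv_bLoop_eq hk]

-- ---- the two candidate pools have the same minimum (nonzero remainder) ----

theorem pv_min_eq {A : List Int} {k : Int} (hk : k ≠ 0)
    (hr : PySem.Int.mod A.sum k ≠ 0) :
    List.foldl min ((A.length : Int)) (pvLA A k)
      = List.foldl min ((A.length : Int)) (pvLB k (PySem.Int.mod A.sum k) A) := by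
  apply pv_foldl_min_eq
  · intro c hc
    refine ⟨c, ?_, le_refl c⟩
    rw [pv_mem_LA] at hc
    obtain ⟨t, s, h1, h2, hlo, hc⟩ := hc
    obtain ⟨hst, hpm⟩ := pv_lastOcc_spec hlo
    have hne : s ≠ t := by
      intro e; subst e; exact pv_match_ne hk hr hpm
    have hslt : s < t := lt_of_le_of_ne hst hne
    rw [pv_mem_LB]
    refine ⟨s, by omega, ?_⟩
    rw [pv_mem_LBsuf]
    refine ⟨t - s - 1, ?_, ?_, ?_⟩
    · rw [List.length_drop]; omega
    · have he : t - s - 1 + 1 = t - s := by omega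
      rw [he]
      exact (pv_cond_iff hk hst).2 hpm
    · rw [hc]; push_cast; omega
  · intro c hc
    rw [pv_mem_LB] at hc
    obtain ⟨i, hi, hc⟩ := hc
    rw [pv_mem_LBsuf] at hc
    obtain ⟨j, hj, hcond, hc⟩ := hc
    have hlen : j < A.length - i := by
      rw [List.length_drop] at hj; omega
    have hst : i ≤ i + j + 1 := by omega
    have hcond' : pvPm A k i = pvWant A k (i + j + 1) := by
      refine (pv_cond_iff hk hst).1 ?_
      have he : (i + j + 1) - i = j + 1 := by omega
      rw [he]
      exact hcond
    obtain ⟨s', hlo, hge⟩ := pv_lastOcc_last hst hcond'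
    obtain ⟨hs't, _⟩ := pv_lastOcc_spec hlo
    refine ⟨((i + j + 1 : Nat) : Int) - (s' : Int), ?_, ?_⟩
    · rw [pv_mem_LA]
      exact ⟨i + j + 1, s', by omega, by omega, hlo, rfl⟩
    · rw [hc]; push_cast; omega

-- ---- zero remainder: A's pool has minimum 0 on a nonempty list ----

theorem pv_LA_zero {A : List Int} {k : Int} (hk : k ≠ 0)
    (hr : PySem.Int.mod A.sum k = 0) (hn : 1 ≤ A.length) :
    List.foldl min ((A.length : Int)) (pvLA A k) = 0 := by
  apply le_antisymm
  · have hv : pvPm A k 1 = pvWant A k 1 := by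
      unfold pvWant
      rw [hr, sub_zero]
      unfold pvPm
      rw [pv_mod_idem hk]
    obtain ⟨s', hlo, hge⟩ := pv_lastOcc_last (le_refl 1) hv
    obtain ⟨hle, _⟩ := pv_lastOcc_spec hlo
    have hs1 : s' = 1 := by omega
    subst hs1
    have hmem : (0 : Int) ∈ pvLA A k := by
      rw [pv_mem_LA]
      exact ⟨1, 1, le_refl 1, hn, hlo, by norm_num⟩
    exact pv_foldl_min_le_mem _ _ hmem
  · apply pv_le_foldl_min (by positivity)
    intro c hc
    rw [pv_mem_LA] at hc
    obtain ⟨t, s, h1, h2, hlo, hc⟩ := hc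
    have := (pv_lastOcc_spec hlo).1
    omega

theorem pv_LA_nil {k : Int} : pvLA ([] : List Int) k = [] := rfl

-- ===== VERDICT (by name: the statement is the Claim_ definition above) =====
theorem sum_divisible_by_k_spec : Claim_equal_sum_divisible_by_k := by
  intro A k _ hk
  unfold Spec_sum_divisible_by_k
  rw [pvA_eq hk, pvB_eq hk]
  by_cases hr : PySem.Int.mod A.sum k = 0
  · rw [if_pos hr]
    cases hA : A with
    | nil =>
      subst hA
      norm_num [pv_LA_nil]
    | cons a rest =>
      have hn : 1 ≤ A.length := by rw [hA]; simp
      rw [← hA, pv_LA_zero hk hr hn]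
  · rw [if_neg hr, pv_min_eq hk hr]
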